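-- pv_equiv track=rewrite | github.com/adalfarus/aplustools | src/aplustools/security/unsafe.py | umreihen
-- ===== SOURCE A (Python) =====
-- def umreihen(num_lst: list, depth: int) -> list:
--     if not num_lst:  # Check if the list is empty
--         return []
--
--     curr_num_lst = num_lst
--     for _ in range(depth):
--         new_num_lst = []
--         for num in curr_num_lst:
--             if num != 0:
--                 index = num % len(curr_num_lst)
--                 new_num_lst.append(curr_num_lst[index - 1 if index > 0 else index])
--             else:
--                 new_num_lst.append(curr_num_lst[num])
--         curr_num_lst = new_num_lst
--     return curr_num_lst
-- ===== SOURCE B (Python) =====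
-- def umreihen(num_lst: list, depth: int) -> list:
--     # Cycle detection: states repeat, so memoize each state and jump ahead
--     # with modular arithmetic once the first repeat is found.
--     if not num_lst:
--         return []
--     n = len(num_lst)
--
--     def step(cur):
--         out = []
--         for v in cur:
--             m = v % n
--             out.append(cur[m - 1] if m > 0 else cur[0])
--         return out
--
--     seen = {tuple(num_lst): 0}
--     states = [num_lst]
--     k = 0
--     while k < depth:
--         nxt = step(states[-1])
--         k += 1
--         j = seen.get(tuple(nxt))
--         if j is not None:
--             cycle = k - j
--             return states[j + (depth - j) % cycle]
--         seen[tuple(nxt)] = k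
--         states.append(nxt)
--     return states[-1]
-- ===== Notes on version B (the rewrite author's own statement) =====
-- stated objective: faster
-- what changed: Instead of applying the rearrangement step depth times, B memoizes each intermediate list state in a dict, detects the first repeated state, and jumps directly to the final state via modular arithmetic on the cycle length.
import Mathlib
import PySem

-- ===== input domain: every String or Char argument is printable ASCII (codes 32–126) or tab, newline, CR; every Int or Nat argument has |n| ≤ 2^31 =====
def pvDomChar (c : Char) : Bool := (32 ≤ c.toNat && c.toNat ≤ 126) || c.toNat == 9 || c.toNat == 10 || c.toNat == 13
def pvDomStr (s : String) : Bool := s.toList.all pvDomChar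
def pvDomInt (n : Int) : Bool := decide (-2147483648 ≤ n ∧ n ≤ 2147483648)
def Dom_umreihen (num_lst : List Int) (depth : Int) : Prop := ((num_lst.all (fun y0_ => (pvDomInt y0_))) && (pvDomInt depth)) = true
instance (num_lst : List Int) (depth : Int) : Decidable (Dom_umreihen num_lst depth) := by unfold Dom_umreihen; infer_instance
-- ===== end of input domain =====

-- B replaces A's depth-fold of the rearrangement step by state memoization with
-- cycle detection, jumping to the final state by modular arithmetic (faster in a timing run).


-- ===== PORT A =====
-- literal transliteration of A; every index used is provably in range (the current
-- list stays nonempty and 0 ≤ num % len < len), so pyGetD's default is never taken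
def umreihen (num_lst : List Int) (depth : Int) : List Int :=
  if num_lst = [] then []
  else
    (PySem.List.pyRange 0 depth 1).foldl
      (fun curr _ =>
        curr.foldl
          (fun new num =>
            if num ≠ 0 then
              let index := PySem.Int.mod num (curr.length : Int)
              new ++ [PySem.List.pyGetD curr (if index > 0 then index - 1 else index) 0]
            else
              new ++ [PySem.List.pyGetD curr num 0])
          [])
      num_lst

-- ===== PORT B =====
-- B's helper `step`: one rearrangement pass (index always in range, default never taken)
def pvStepB (n : Int) (cur : List Int) : List Int :=
  cur.foldl
    (fun out v =>
      let m := PySem.Int.mod v n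
      out ++ [if m > 0 then PySem.List.pyGetD cur (m - 1) 0 else PySem.List.pyGetD cur 0 0])
    []

-- B's `while k < depth` loop; the remaining iteration count is the structural fuel
def pvLoopB (n depth : Int) (seen : PySem.Dict (List Int) Int)
    (states : List (List Int)) (k : Int) : Nat → List Int
  | 0 => (states.getLast?).getD []
  | fuel + 1 =>
    let nxt := pvStepB n ((states.getLast?).getD [])
    let k' := k + 1
    match seen.get? nxt with
    | some j => PySem.List.pyGetD states (j + PySem.Int.mod (depth - j) (k' - j)) []
    | none => pvLoopB n depth (seen.insert nxt k') (states ++ [nxt]) k' fuel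

def umreihen_alt (num_lst : List Int) (depth : Int) : List Int :=
  if num_lst = [] then []
  else
    pvLoopB (num_lst.length : Int) depth
      ((PySem.Dict.empty).insert num_lst 0) [num_lst] 0 depth.toNat

-- ===== PRECONDITION & SPEC =====
def Spec_umreihen (num_lst : List Int) (depth : Int) (out : List Int) : Prop := out = umreihen_alt num_lst depth
instance (num_lst : List Int) (depth : Int) (out : List Int) : Decidable (Spec_umreihen num_lst depth out) := by unfold Spec_umreihen; infer_instance

-- ===== CLAIM (what is proved, stated in full; the proofs are below) =====
def Claim_equal_umreihen : Prop := ∀ (num_lst : List Int) (depth : Int), Dom_umreihen num_lst depth → Spec_umreihen num_lst depth (umreihen num_lst depth)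

-- ===== LEMMAS AND PROOFS =====

-- canonical one-pass step, used by the proofs to describe both programs
def pvS (cur : List Int) : List Int := pvStepB (cur.length : Int) cur

theorem pvStepB_eq_map (n : Int) (cur : List Int) :
    pvStepB n cur =
      cur.map (fun v =>
        if PySem.Int.mod v n > 0 then PySem.List.pyGetD cur (PySem.Int.mod v n - 1) 0
        else PySem.List.pyGetD cur 0 0) := by
  unfold pvStepB
  rw [show (fun (out : List Int) (v : Int) =>
        let m := PySem.Int.mod v n
        out ++ [if m > 0 then PySem.List.pyGetD cur (m - 1) 0 else PySem.List.pyGetD cur 0 0])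
      = fun (out : List Int) (v : Int) =>
        out ++ [if PySem.Int.mod v n > 0 then PySem.List.pyGetD cur (PySem.Int.mod v n - 1) 0
                else PySem.List.pyGetD cur 0 0] from rfl,
    PySem.List.foldl_append_singleton_eq_map, List.nil_append]

theorem pvS_length (cur : List Int) : (pvS cur).length = cur.length := by
  rw [pvS, pvStepB_eq_map, List.length_map]

theorem pvS_iter_length (L : List Int) (k : Nat) : (pvS^[k] L).length = L.length := by
  induction k with
  | zero => rfl
  | succ k ih => rw [Function.iterate_succ_apply', pvS_length, ih]

theorem pvS_ne_nil (M : List Int) (hM : M ≠ []) : pvS M ≠ [] := by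
  intro h
  have := pvS_length M
  rw [h] at this
  exact hM (List.eq_nil_of_length_eq_zero this.symm)

-- indexing helpers for the `states` list (a map over a range)
theorem pv_last_map_range (f : Nat → List Int) (n : Nat) (d : List Int) :
    (((List.range (n + 1)).map f).getLast?).getD d = f n := by
  rw [List.getLast?_eq_getElem?, List.length_map, List.length_range, Nat.add_sub_cancel,
    List.getElem?_map, List.getElem?_range (Nat.lt_succ_self n)]
  rfl

theorem pv_getD_map_range (f : Nat → List Int) (n k : Nat) (d : List Int) (h : k < n) :
    ((List.range n).map f).getD k d = f k := by
  rw [List.getD_eq_getElem?_getD, List.getElem?_map, List.getElem?_range h]; rfl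

-- A's inner loop is B's step (a nonempty current list gives 0 ≤ num % len < len)
theorem innerA_eq_step (cur : List Int) (h : cur ≠ []) :
    cur.foldl
      (fun new num =>
        if num ≠ 0 then
          let index := PySem.Int.mod num (cur.length : Int)
          new ++ [PySem.List.pyGetD cur (if index > 0 then index - 1 else index) 0]
        else
          new ++ [PySem.List.pyGetD cur num 0])
      [] = pvS cur := by
  have hpos : (0 : Int) < (cur.length : Int) := by
    have := List.length_pos_iff.mpr h
    exact_mod_cast this
  have hfun : (fun (new : List Int) (num : Int) =>
      if num ≠ 0 then
        let index := PySem.Int.mod num (cur.length : Int)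
        new ++ [PySem.List.pyGetD cur (if index > 0 then index - 1 else index) 0]
      else
        new ++ [PySem.List.pyGetD cur num 0])
      = fun (new : List Int) (num : Int) =>
        new ++ [if num ≠ 0 then
            PySem.List.pyGetD cur
              (if PySem.Int.mod num (cur.length : Int) > 0 then
                PySem.Int.mod num (cur.length : Int) - 1
              else PySem.Int.mod num (cur.length : Int)) 0
          else PySem.List.pyGetD cur num 0] := by
    funext new num
    by_cases hv : num ≠ 0 <;> simp [hv]
  rw [hfun, PySem.List.foldl_append_singleton_eq_map, List.nil_append, pvS, pvStepB_eq_map]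
  apply List.map_congr_left
  intro v _
  by_cases hv : v = 0
  · subst hv
    have h0 : PySem.Int.mod 0 (cur.length : Int) = 0 := by
      rw [PySem.Int.mod_eq_emod_of_pos hpos]; simp
    simp [h0]
  · have hnn : 0 ≤ PySem.Int.mod v (cur.length : Int) := PySem.Int.mod_nonneg v hpos
    by_cases hm : PySem.Int.mod v (cur.length : Int) > 0
    · simp [hv, hm]
    · have hz : PySem.Int.mod v (cur.length : Int) = 0 := le_antisymm (not_lt.mp hm) hnn
      simp [hv, hz]

-- A = iterate the step depth.toNat times
theorem umreihen_eq_iter (L : List Int) (depth : Int) (hL : L ≠ []) :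
    umreihen L depth = pvS^[depth.toNat] L := by
  unfold umreihen
  rw [if_neg hL]
  have key : ∀ (r : List Int) (M : List Int), M ≠ [] →
      r.foldl
        (fun curr _ =>
          curr.foldl
            (fun new num =>
              if num ≠ 0 then
                let index := PySem.Int.mod num (curr.length : Int)
                new ++ [PySem.List.pyGetD curr (if index > 0 then index - 1 else index) 0]
              else
                new ++ [PySem.List.pyGetD curr num 0])
            [])
        M = pvS^[r.length] M := by
    intro r
    induction r with
    | nil => intro M _; rfl
    | cons a r ih =>
      intro M hM
      rw [List.foldl_cons, innerA_eq_step M hM, List.length_cons,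
        Function.iterate_succ_apply]
      exact ih (pvS M) (pvS_ne_nil M hM)
  rw [key (PySem.List.pyRange 0 depth 1) L hL, PySem.List.length_pyRange_one]
  norm_num

-- periodicity: once a state repeats, the trajectory is eventually periodic
theorem iter_period {α : Type} (f : α → α) (x : α) (j c : Nat) (hc : 0 < c)
    (h : f^[j + c] x = f^[j] x) :
    ∀ m : Nat, f^[j + m] x = f^[j + m % c] x := by
  intro m
  induction m using Nat.strong_induction_on with
  | _ m ih =>
    by_cases hm : m < c
    · rw [Nat.mod_eq_of_lt hm]
    · have hmc : c ≤ m := not_lt.mp hm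
      have e1 : j + m = (m - c) + (j + c) := by omega
      have e2 : j + (m - c) = (m - c) + j := by omega
      calc f^[j + m] x = f^[m - c] (f^[j + c] x) := by
              rw [← Function.iterate_add_apply, e1]
        _ = f^[m - c] (f^[j] x) := by rw [h]
        _ = f^[j + (m - c)] x := by rw [← Function.iterate_add_apply, e2]
        _ = f^[j + (m - c) % c] x := ih (m - c) (by omega)
        _ = f^[j + m % c] x := by rw [← Nat.mod_eq_sub_mod hmc]

-- main loop invariant for B
theorem pvLoopB_correct (L : List Int) (depth : Int) :
    ∀ (fuel kn : Nat) (seen : PySem.Dict (List Int) Int) (states : List (List Int)),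
      states = (List.range (kn + 1)).map (fun j => pvS^[j] L) →
      seen.items = (List.range (kn + 1)).map (fun j => (pvS^[j] L, (j : Int))) →
      (∀ i j : Nat, i < j → j ≤ kn → pvS^[i] L ≠ pvS^[j] L) →
      fuel + kn = depth.toNat →
      pvLoopB (L.length : Int) depth seen states (kn : Int) fuel = pvS^[depth.toNat] L := by
  intro fuel
  induction fuel with
  | zero =>
    intro kn seen states hst _ _ hfuel
    simp only [Nat.zero_add] at hfuel
    subst hfuel
    rw [pvLoopB, hst, pv_last_map_range]
  | succ fuel ih =>
    intro kn seen states hst hseen hinj hfuel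
    have hlast : (states.getLast?).getD [] = pvS^[kn] L := by
      rw [hst, pv_last_map_range]
    have hkd : kn + 1 ≤ depth.toNat := by omega
    have hnxt : pvStepB (L.length : Int) ((states.getLast?).getD []) = pvS^[kn + 1] L := by
      rw [hlast, Function.iterate_succ_apply', pvS, pvS_iter_length]
    have hkeys : seen.keys = (List.range (kn + 1)).map (fun j => pvS^[j] L) := by
      rw [PySem.Dict.keys, hseen, List.map_map]
      rfl
    have hnodup : seen.keys.Nodup := by
      rw [hkeys]
      refine List.Nodup.map_on ?_ List.nodup_range
      intro i hi j hj hij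
      rw [List.mem_range] at hi hj
      rcases Nat.lt_trichotomy i j with h | h | h
      · exact absurd hij (hinj i j h (Nat.lt_succ_iff.mp hj))
      · exact h
      · exact absurd hij.symm (hinj j i h (Nat.lt_succ_iff.mp hi))
    rw [pvLoopB]
    simp only [hnxt]
    cases hget : seen.get? (pvS^[kn + 1] L) with
    | some jv =>
      -- a repeat: pvS^[kn+1] L = pvS^[j] L with j ≤ kn; jump via the cycle
      have hmem : (pvS^[kn + 1] L, jv) ∈ seen.items :=
        PySem.Dict.mem_items_of_get?_eq_some seen hget
      rw [hseen] at hmem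
      simp only [List.mem_map, List.mem_range] at hmem
      obtain ⟨j, hj, hpair⟩ := hmem
      have hjk : j ≤ kn := Nat.lt_succ_iff.mp hj
      have hrep : pvS^[kn + 1] L = pvS^[j] L := congrArg Prod.fst hpair |>.symm
      have hjv : jv = (j : Int) := (congrArg Prod.snd hpair).symm
      subst hjv
      set c : Nat := kn + 1 - j with hc
      have hcpos : 0 < c := by omega
      have hper : pvS^[j + c] L = pvS^[j] L := by
        have hjc : j + c = kn + 1 := by omega
        rw [hjc, hrep]
      have hdpos : (kn : Int) + 1 ≤ depth := by omega
      have hcast : (kn : Int) + 1 - (j : Int) = (c : Int) := by omega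
      have hdcast : depth - (j : Int) = ((depth.toNat - j : Nat) : Int) := by omega
      have hmodcast : PySem.Int.mod (depth - (j : Int)) ((kn : Int) + 1 - (j : Int))
          = (((depth.toNat - j) % c : Nat) : Int) := by
        rw [hcast, hdcast]
        exact_mod_cast PySem.Int.mod_natCast (depth.toNat - j) c
      dsimp only
      rw [hmodcast]
      set r : Nat := (depth.toNat - j) % c with hr
      have hidx : (j : Int) + (r : Int) = ((j + r : Nat) : Int) := by push_cast; ring
      have hjr : j + r < kn + 1 := by
        have : r < c := Nat.mod_lt _ hcpos
        omega
      rw [hidx, PySem.List.pyGetD_natCast, hst, pv_getD_map_range _ _ _ _ hjr]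
      have hp := iter_period pvS L j c hcpos hper (depth.toNat - j)
      rw [← hr] at hp
      have e : j + (depth.toNat - j) = depth.toNat := by omega
      rw [e] at hp
      exact hp.symm
    | none =>
      -- a fresh state: extend the table and recurse
      dsimp only
      have hcontains : seen.contains (pvS^[kn + 1] L) = false := by
        rw [PySem.Dict.contains_eq_isSome_get?, hget]
        rfl
      have hnotmem : pvS^[kn + 1] L ∉ seen.keys := by
        rw [PySem.Dict.contains_eq_decide_mem_keys] at hcontains
        simpa using hcontains
      have hx : (kn : Int) + 1 = ((kn + 1 : Nat) : Int) := by push_cast; ring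
      rw [hx]
      apply ih (kn + 1)
      · rw [hst, show List.range (kn + 1 + 1) = List.range (kn + 1) ++ [kn + 1] from
          List.range_succ, List.map_append]
        rfl
      · rw [PySem.Dict.items_insert_of_not_contains _ _ hcontains, hseen,
          show List.range (kn + 1 + 1) = List.range (kn + 1) ++ [kn + 1] from
            List.range_succ, List.map_append]
        rfl
      · intro i j hij hj
        by_cases hjk : j ≤ kn
        · exact hinj i j hij hjk
        · have hj1 : j = kn + 1 := by omega
          subst hj1
          intro heq
          apply hnotmem
          rw [hkeys, ← heq]
          exact List.mem_map_of_mem (List.mem_range.mpr (by omega))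
      · omega

-- ===== VERDICT (by name: the statement is the Claim_ definition above) =====
theorem umreihen_spec : Claim_equal_umreihen := by
  intro num_lst depth _
  unfold Spec_umreihen umreihen_alt
  by_cases hL : num_lst = []
  · simp [hL, umreihen]
  · rw [if_neg hL, umreihen_eq_iter num_lst depth hL]
    exact (pvLoopB_correct num_lst depth depth.toNat 0 _ _
      (by simp [List.range_one]) (by rfl) (by omega) (by omega)).symm
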